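-- pv_equiv track=rewrite | github.com/pirovc/ganon | scripts/LCA.py | PrefixMinima
-- ===== SOURCE A (Python) =====
-- def PrefixMinima(X,reversed=False):
--     """Compute table of prefix minima
--     (or suffix minima, if reversed=True) of list X.
--     """
--     current = None
--     output = [None]*len(X)
--     for x,i in _pairs(X,reversed):
--         if current is None:
--             current = x
--         else:
--             current = min(current,x)
--         output[i] = current
--     return output
--
-- def _pairs(X,reversed=False):
--     """Return pairs (x,i) for x in list X, where i is
--     the index of x in the data, in forward or reverse order.
--     """
--     if reversed:
--         indices = range(len(X)-1,-1,-1)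
--     else:
--         indices = range(len(X))
--     return [(X[i],i) for i in indices]
-- ===== SOURCE B (Python) =====
-- def PrefixMinima(X, reversed=False):
--     """Prefix minima (suffix minima if reversed=True) via direct slice scans."""
--     if reversed:
--         return [min(X[i:]) for i in range(len(X))]
--     return [min(X[:i + 1]) for i in range(len(X))]
-- ===== Notes on version B (the rewrite author's own statement) =====
-- stated objective: simpler
-- what changed: Replaced the _pairs index-pair helper and the single-pass running-minimum accumulator with two direct comprehensions that compute each entry as min of the corresponding prefix (or suffix) slice.
import Mathlib
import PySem

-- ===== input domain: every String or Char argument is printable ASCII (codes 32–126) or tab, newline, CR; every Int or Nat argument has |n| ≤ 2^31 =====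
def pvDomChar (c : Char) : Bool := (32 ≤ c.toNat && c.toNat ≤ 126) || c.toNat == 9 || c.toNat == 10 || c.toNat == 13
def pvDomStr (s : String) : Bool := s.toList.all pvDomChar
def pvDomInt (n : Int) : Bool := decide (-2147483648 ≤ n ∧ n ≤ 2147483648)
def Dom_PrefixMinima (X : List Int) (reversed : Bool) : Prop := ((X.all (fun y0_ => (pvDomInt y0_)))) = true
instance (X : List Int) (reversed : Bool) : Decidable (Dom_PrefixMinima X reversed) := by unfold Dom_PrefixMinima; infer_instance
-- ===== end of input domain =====

-- B replaces A's _pairs helper and running-minimum accumulator loop by two direct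
-- comprehensions (min of each prefix slice, resp. suffix slice): simpler, not faster.

-- ===== PORT A =====
-- helper _pairs: indices = range(len(X)-1,-1,-1) or range(len(X)); [(X[i], i) for i in indices].
-- Every i produced is in range, so X[i] never raises; pyGetD with default 0 is exact here.
def pvPairs (X : List Int) (reversed : Bool) : List (Int × Int) :=
  let indices : List Int :=
    if reversed then PySem.List.pyRange ((X.length : Int) - 1) (-1) (-1)
    else PySem.List.pyRange 0 (X.length : Int) 1
  indices.map (fun i => (PySem.List.pyGetD X i 0, i))

-- the loop body: update current (None ↦ x, some c ↦ min c x) and write output[i] = current.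
def pvStep (st : Option Int × List Int) (p : Int × Int) : Option Int × List Int :=
  let current : Int := match st.1 with | none => p.1 | some c => min c p.1
  (some current, PySem.List.pySetD st.2 p.2 current)

-- Python's output starts as [None]*len(X); every slot is overwritten before return,
-- so the placeholder is modelled by 0 (never visible in the result).
def PrefixMinima (X : List Int) (reversed : Bool) : List Int :=
  ((pvPairs X reversed).foldl pvStep (none, List.replicate X.length 0)).2

-- ===== PORT B =====
-- [min(X[i:]) for i in range(len(X))]  /  [min(X[:i+1]) for i in range(len(X))].
-- Each slice is nonempty (i < len(X)), so min never raises; .getD 0 discharges the Option.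
def PrefixMinima_alt (X : List Int) (reversed : Bool) : List Int :=
  if reversed then
    (PySem.List.pyRange 0 (X.length : Int) 1).map (fun i =>
      (PySem.List.min? (PySem.List.slice X (some i) none) (fun y => y)).getD 0)
  else
    (PySem.List.pyRange 0 (X.length : Int) 1).map (fun i =>
      (PySem.List.min? (PySem.List.slice X none (some (i + 1))) (fun y => y)).getD 0)

-- ===== PRECONDITION & SPEC =====
def Spec_PrefixMinima (X : List Int) (reversed : Bool) (out : List Int) : Prop := out = PrefixMinima_alt X reversed
instance (X : List Int) (reversed : Bool) (out : List Int) : Decidable (Spec_PrefixMinima X reversed out) := by unfold Spec_PrefixMinima; infer_instance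

-- ===== CLAIM (what is proved, stated in full; the proofs are below) =====
def Claim_equal_PrefixMinima : Prop := ∀ (X : List Int) (reversed : Bool), Dom_PrefixMinima X reversed → Spec_PrefixMinima X reversed (PrefixMinima X reversed)

-- ===== LEMMAS AND PROOFS =====

-- running minimum with a None start, as an Option fold
def pvOpmin (c : Option Int) (x : Int) : Int := match c with | none => x | some c => min c x

def pvMo (c : Option Int) (l : List Int) : Option Int :=
  l.foldl (fun o x => some (pvOpmin o x)) c

-- the forward pair list [(x_k, k), (x_{k+1}, k+1), …]
def pvPairsF : List Int → Nat → List (Int × Int)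
  | [], _ => []
  | x :: xs, k => (x, (k : Int)) :: pvPairsF xs (k + 1)

-- prefix-minima / suffix-minima tables as range maps
def pvAccF (c : Option Int) (xs : List Int) : List Int :=
  (List.range xs.length).map (fun k => (pvMo c (xs.take (k + 1))).getD 0)

def pvAccR (c : Option Int) (xs : List Int) : List Int :=
  (List.range xs.length).map (fun k => (pvMo c (xs.drop k)).getD 0)

lemma pvMo_append_singleton (c : Option Int) (l : List Int) (x : Int) :
    pvMo c (l ++ [x]) = some (pvOpmin (pvMo c l) x) := by
  simp [pvMo, List.foldl_append]

lemma pvOpmin_swap (c : Option Int) (x y : Int) :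
    pvOpmin (some (pvOpmin c x)) y = pvOpmin (some (pvOpmin c y)) x := by
  cases c <;> simp [pvOpmin, min_comm, min_left_comm]

lemma pvMo_snoc_eq_cons (l : List Int) : ∀ (c : Option Int) (x : Int),
    pvMo c (l ++ [x]) = pvMo c (x :: l) := by
  induction l with
  | nil => intro c x; rfl
  | cons y l ih =>
    intro c x
    show pvMo (some (pvOpmin c y)) (l ++ [x]) = pvMo (some (pvOpmin c x)) (y :: l)
    rw [ih]
    show pvMo (some (pvOpmin (some (pvOpmin c y)) x)) l
        = pvMo (some (pvOpmin (some (pvOpmin c x)) y)) l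
    rw [pvOpmin_swap]

lemma pvMo_reverse (l : List Int) : ∀ (c : Option Int), pvMo c l.reverse = pvMo c l := by
  induction l with
  | nil => intro c; rfl
  | cons x l ih =>
    intro c
    rw [List.reverse_cons, pvMo_snoc_eq_cons]
    show pvMo (some (pvOpmin c x)) l.reverse = _
    rw [ih]
    rfl

lemma pvMo_some (a : Int) (l : List Int) : pvMo (some a) l = some (l.foldl min a) := by
  induction l generalizing a with
  | nil => rfl
  | cons x l ih => simpa [pvMo, pvOpmin] using ih (min a x)

lemma pvMin?_eq_pvMo (l : List Int) (h : l ≠ []) :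
    PySem.List.min? l (fun y => y) = pvMo none l := by
  cases l with
  | nil => exact absurd rfl h
  | cons x t =>
    rw [PySem.List.min?_id_cons]
    show _ = pvMo (some x) t
    rw [pvMo_some]

lemma pvSetTake (out : List Int) (k : Nat) (v : Int) (h : k < out.length) :
    (out.set k v).take (k + 1) = out.take k ++ [v] := by
  apply List.ext_getElem
  · simp; omega
  · intro i h1 h2
    simp only [List.getElem_take, List.getElem_set]
    simp only [List.length_take, lt_min_iff] at h1
    rcases Nat.lt_or_ge i k with hik | hik
    · rw [List.getElem_append_left (by simp; omega), List.getElem_take]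
      rw [if_neg (by omega)]
    · have : i = k := by omega
      subst this
      rw [if_pos rfl, List.getElem_append_right (by simp)]
      simp

lemma pvAccF_cons (c : Option Int) (x : Int) (xs : List Int) :
    pvAccF c (x :: xs) = pvOpmin c x :: pvAccF (some (pvOpmin c x)) xs := by
  rw [pvAccF, List.length_cons, List.range_succ_eq_map, List.map_cons, List.map_map]
  rfl

lemma pvAccR_cons (c : Option Int) (x : Int) (xs : List Int) :
    pvAccR c (x :: xs) = (pvMo c (x :: xs)).getD 0 :: pvAccR c xs := by
  rw [pvAccR, List.length_cons, List.range_succ_eq_map, List.map_cons, List.map_map]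
  rfl

lemma pvPairs_eq_aux (X : List Int) : ∀ (m a : Nat), X.length = a + m →
    (PySem.List.pyRange (a : Int) (X.length : Int) 1).map (fun i => (PySem.List.pyGetD X i 0, i))
      = pvPairsF (X.drop a) a := by
  intro m
  induction m with
  | zero =>
    intro a h
    rw [PySem.List.pyRange_one_eq_nil (by omega), List.drop_of_length_le (by omega)]
    rfl
  | succ m ih =>
    intro a h
    have ha : a < X.length := by omega
    rw [PySem.List.pyRange_one_cons (by exact_mod_cast ha), List.map_cons]
    have h1 : ((a : Int) + 1) = ((a + 1 : Nat) : Int) := by push_cast; ring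
    rw [h1, ih (a + 1) (by omega)]
    have hd : X.drop a = X[a] :: X.drop (a + 1) := (List.getElem_cons_drop ha).symm
    rw [hd]
    show (PySem.List.pyGetD X (a : Int) 0, (a : Int)) :: _ = (X[a], (a : Int)) :: _
    rw [PySem.List.pyGetD_natCast, List.getD_eq_getElem X 0 ha]

lemma pvPairs_false (X : List Int) : pvPairs X false = pvPairsF X 0 := by
  simpa using pvPairs_eq_aux X X.length 0 (by omega)

lemma pvPairs_true (X : List Int) : pvPairs X true = (pvPairsF X 0).reverse := by
  show (PySem.List.pyRange ((X.length : Int) - 1) (-1) (-1)).map _ = _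
  have : PySem.List.pyRange ((X.length : Int) - 1) (-1) (-1)
      = (PySem.List.pyRange 0 (X.length : Int) 1).reverse := by
    have := PySem.List.pyRange_neg_one_eq_reverse ((X.length : Int) - 1) (-1)
    simpa using this
  rw [this, List.map_reverse]
  rw [show (PySem.List.pyRange 0 (X.length : Int) 1).map
        (fun i => (PySem.List.pyGetD X i 0, i)) = pvPairsF X 0 from by
      simpa using pvPairs_eq_aux X X.length 0 (by omega)]

lemma pvFoldF (xs : List Int) : ∀ (k : Nat) (c : Option Int) (out : List Int),
    out.length = k + xs.length →
    (pvPairsF xs k).foldl pvStep (c, out) = (pvMo c xs, out.take k ++ pvAccF c xs) := by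
  induction xs with
  | nil =>
    intro k c out h
    simp only [List.length_nil, Nat.add_zero] at h
    simp [pvPairsF, pvMo, pvAccF, List.take_of_length_le (Nat.le_of_eq h)]
  | cons x xs ih =>
    intro k c out h
    have hk : k < out.length := by simp at h; omega
    show (pvPairsF xs (k + 1)).foldl pvStep (pvStep (c, out) (x, (k : Int))) = _
    have hstep : pvStep (c, out) (x, (k : Int)) = (some (pvOpmin c x), out.set k (pvOpmin c x)) := by
      cases c <;> simp [pvStep, pvOpmin, PySem.List.pySetD_natCast]
    rw [hstep, ih (k + 1) (some (pvOpmin c x)) _ (by simp at h ⊢; omega)]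
    rw [pvSetTake out k _ hk, pvAccF_cons, List.append_assoc]
    rfl

lemma pvFoldR (xs : List Int) : ∀ (k : Nat) (c : Option Int) (out : List Int),
    out.length = k + xs.length →
    ((pvPairsF xs k).reverse).foldl pvStep (c, out) = (pvMo c xs.reverse, out.take k ++ pvAccR c xs) := by
  induction xs with
  | nil =>
    intro k c out h
    simp only [List.length_nil, Nat.add_zero] at h
    simp [pvPairsF, pvMo, pvAccR, List.take_of_length_le (Nat.le_of_eq h)]
  | cons x xs ih =>
    intro k c out h
    have hk : k < out.length := by simp at h; omega
    show (((x, (k : Int)) :: pvPairsF xs (k + 1)).reverse).foldl pvStep (c, out) = _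
    rw [List.reverse_cons, List.foldl_append, ih (k + 1) c out (by simp at h ⊢; omega)]
    have hcur : pvMo c ((x :: xs).reverse)
        = some (pvOpmin (pvMo c xs.reverse) x) := by
      rw [List.reverse_cons, pvMo_append_singleton]
    set cur := pvOpmin (pvMo c xs.reverse) x with hcurdef
    have hstep : pvStep (pvMo c xs.reverse, out.take (k + 1) ++ pvAccR c xs) (x, (k : Int))
        = (some cur, (out.take (k + 1) ++ pvAccR c xs).set k cur) := by
      cases hmo : pvMo c xs.reverse <;> simp [pvStep, pvOpmin, hcurdef, hmo, PySem.List.pySetD_natCast]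
    show List.foldl pvStep _ [(x, (k : Int))] = _
    rw [List.foldl_cons, List.foldl_nil, hstep, hcur]
    have hlt : k < (out.take (k + 1)).length := by simp [List.length_take]; omega
    rw [List.set_append_left _ _ hlt]
    have ht : (out.take (k + 1)).set k cur = out.take k ++ [cur] := by
      rw [← List.take_set, pvSetTake out k _ hk]
    rw [ht, pvAccR_cons, List.append_assoc]
    have hval : cur = (pvMo c (x :: xs)).getD 0 := by
      rw [← pvMo_reverse, hcur]; rfl
    rw [hval]
    rfl

lemma pvA_false (X : List Int) : PrefixMinima X false = pvAccF none X := by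
  unfold PrefixMinima
  rw [pvPairs_false, pvFoldF X 0 none _ (by simp)]
  simp

lemma pvA_true (X : List Int) : PrefixMinima X true = pvAccR none X := by
  unfold PrefixMinima
  rw [pvPairs_true, pvFoldR X 0 none _ (by simp)]
  simp

lemma pvB_false (X : List Int) : PrefixMinima_alt X false = pvAccF none X := by
  show (PySem.List.pyRange 0 (X.length : Int) 1).map _ = _
  rw [PySem.List.pyRange_zero_nat, List.map_map]
  refine List.map_congr_left (fun k hk => ?_)
  have hk' : k < X.length := List.mem_range.mp hk
  show (PySem.List.min? (PySem.List.slice X none (some ((k : Int) + 1))) (fun y => y)).getD 0 = _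
  have h1 : ((k : Int) + 1) = ((k + 1 : Nat) : Int) := by push_cast; ring
  rw [h1, PySem.List.slice_to_natCast]
  rw [pvMin?_eq_pvMo _ (by
    rw [Ne, List.take_eq_nil_iff]
    push Not
    exact ⟨by omega, by intro hX; rw [hX] at hk'; simp at hk'⟩)]

lemma pvB_true (X : List Int) : PrefixMinima_alt X true = pvAccR none X := by
  show (PySem.List.pyRange 0 (X.length : Int) 1).map _ = _
  rw [PySem.List.pyRange_zero_nat, List.map_map]
  refine List.map_congr_left (fun k hk => ?_)
  have hk' : k < X.length := List.mem_range.mp hk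
  show (PySem.List.min? (PySem.List.slice X (some (k : Int)) none) (fun y => y)).getD 0 = _
  rw [PySem.List.slice_from_natCast]
  rw [pvMin?_eq_pvMo _ (by
    rw [Ne, List.drop_eq_nil_iff]
    omega)]

-- ===== VERDICT (by name: the statement is the Claim_ definition above) =====
theorem PrefixMinima_spec : Claim_equal_PrefixMinima := by
  intro X reversed _
  unfold Spec_PrefixMinima
  cases reversed
  · rw [pvA_false, pvB_false]
  · rw [pvA_true, pvB_true]
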